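-- pv_equiv track=rewrite | github.com/Cvaniak/AdventOfCode | Day17/main.py | part_2
-- ===== SOURCE A (Python) =====
-- def part_2(data):
--     a = []
--     for yi, y in enumerate(data):
--         for xi, x in enumerate(y):
--             if x == "#":
--                 a.append((xi, yi, 0, 0))
--     arround_t = [(x, y, z, w) for x in range(-1,2) for y in range(-1,2) for z in range(-1,2) for w in range(-1,2)]
--     arround_t.remove((0,0,0,0))
--     for _ in range(6):
--         a_new = []
--         arround = list([(ax+tx, ay+ty, az+tz, aw+tw) for ax, ay, az, aw in a for tx, ty, tz, tw in arround_t])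
--         arround_s = set(arround)
--         for d in arround_s:
--             if d in a:
--                 if arround.count(d) <= 3 and arround.count(d) >=2:
--                     a_new.append(d)
--             elif arround.count(d) == 3:
--                 a_new.append(d)
--         a = a_new[:]
--     return len(a)
-- ===== SOURCE B (Python) =====
-- def part_2(data):
--     active = {(xi, yi, 0, 0)
--               for yi, row in enumerate(data)
--               for xi, ch in enumerate(row) if ch == "#"}
--     for _ in range(6):
--         if not active:
--             break
--         lo = [min(p[i] for p in active) - 1 for i in range(4)]
--         hi = [max(p[i] for p in active) + 2 for i in range(4)]
--         new = set()
--         for x in range(lo[0], hi[0]):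
--             for y in range(lo[1], hi[1]):
--                 for z in range(lo[2], hi[2]):
--                     for w in range(lo[3], hi[3]):
--                         n = 0
--                         for dx in (-1, 0, 1):
--                             for dy in (-1, 0, 1):
--                                 for dz in (-1, 0, 1):
--                                     for dw in (-1, 0, 1):
--                                         if (dx, dy, dz, dw) != (0, 0, 0, 0) \
--                                            and (x + dx, y + dy, z + dz, w + dw) in active:
--                                             n += 1
--                         if n == 3 or (n == 2 and (x, y, z, w) in active):
--                             new.add((x, y, z, w))
--         active = new
--     return len(active)
-- ===== Notes on version B (the rewrite author's own statement) =====
-- stated objective: alternative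
-- what changed: A keeps the live cells in a list, builds the full neighbour multiset each generation and re-scans it with arround.count per candidate; B keeps a set of live cells and each generation densely scans the bounding box grown by one, gathering each cell's live-neighbour count with 80 set-membership tests (no neighbour list, no counting passes).
import Mathlib
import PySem

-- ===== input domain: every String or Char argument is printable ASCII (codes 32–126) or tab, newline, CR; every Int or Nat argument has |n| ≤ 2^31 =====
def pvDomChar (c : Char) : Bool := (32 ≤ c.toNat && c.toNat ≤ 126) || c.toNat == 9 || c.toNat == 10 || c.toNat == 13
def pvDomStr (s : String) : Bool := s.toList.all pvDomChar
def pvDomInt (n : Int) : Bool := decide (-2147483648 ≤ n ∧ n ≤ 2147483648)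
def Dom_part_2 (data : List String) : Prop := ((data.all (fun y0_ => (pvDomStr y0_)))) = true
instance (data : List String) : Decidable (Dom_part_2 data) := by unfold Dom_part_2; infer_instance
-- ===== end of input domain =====

-- B replaces A's sparse neighbour-multiset tally (build the full neighbour list, re-scan it with
-- list.count per candidate) with a dense bounding-box scan that, for each cell of the box, gathers
-- its live-neighbour count by 80 set-membership tests (different algorithm, same result).


-- a 4D cell (x, y, z, w)
abbrev Cell4 : Type := Int × Int × Int × Int

-- ===== PORT A =====
-- arround_t: all 81 offsets minus (0,0,0,0), removed with list.remove (PySem.List.remove?;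
-- the element is provably present, so getD never takes the default)
def pvOffsetsA : List Cell4 :=
  let l := (PySem.List.pyRange (-1) 2 1).flatMap (fun x =>
    (PySem.List.pyRange (-1) 2 1).flatMap (fun y =>
      (PySem.List.pyRange (-1) 2 1).flatMap (fun z =>
        (PySem.List.pyRange (-1) 2 1).map (fun w => (x, y, z, w)))))
  (PySem.List.remove? l ((0 : Int), (0 : Int), (0 : Int), (0 : Int))).getD l

-- one generation of A: build the full neighbour list, iterate its set, re-scan with count
def pvStepA (a : List Cell4) : List Cell4 :=
  let arround := a.flatMap (fun c => pvOffsetsA.map (fun t =>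
    (c.1 + t.1, c.2.1 + t.2.1, c.2.2.1 + t.2.2.1, c.2.2.2 + t.2.2.2)))
  let arroundS : PySem.Set Cell4 := PySem.Set.ofList arround
  arroundS.foldl (fun acc d =>
    if a.contains d then
      (if PySem.List.count arround d ≤ 3 && 2 ≤ PySem.List.count arround d then acc ++ [d] else acc)
    else if PySem.List.count arround d == 3 then acc ++ [d] else acc) []

def part_2 (data : List String) : Int :=
  let a : List Cell4 := (PySem.List.enumerate data).foldl (fun acc yp =>
    (PySem.List.enumerate yp.2.toList).foldl (fun acc xp =>
      if xp.2 == '#' then acc ++ [(xp.1, yp.1, (0 : Int), (0 : Int))] else acc) acc) []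
  let a := (List.range 6).foldl (fun a _ => pvStepA a) a
  (a.length : Int)

-- ===== PORT B =====
-- min(...)/max(...) of a generator (B only calls them under the emptiness guard, so the
-- 0 of the none branch is never used)
def pvMinI (l : List Int) : Int := match PySem.List.min? l (fun x => x) with | some m => m | none => 0
def pvMaxI (l : List Int) : Int := match PySem.List.max? l (fun x => x) with | some m => m | none => 0

-- the gathered live-neighbour count of cell (x,y,z,w): four nested loops over (-1,0,1)
def pvGCount (active : List Cell4) (x y z w : Int) : Int :=
  [(-1 : Int), 0, 1].foldl (fun n dx =>
    [(-1 : Int), 0, 1].foldl (fun n dy =>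
      [(-1 : Int), 0, 1].foldl (fun n dz =>
        [(-1 : Int), 0, 1].foldl (fun n dw =>
          if decide ((dx, dy, dz, dw) ≠ ((0 : Int), (0 : Int), (0 : Int), (0 : Int))) &&
             active.contains (x + dx, y + dy, z + dz, w + dw) then n + 1 else n) n) n) n) 0

-- one generation of B: dense scan of the bounding box grown by one
-- (lo/hi: Python's two comprehensions over the four coordinates, written out)
def pvStepB (active : PySem.Set Cell4) : PySem.Set Cell4 :=
  let lo0 := pvMinI (active.map (fun p => p.1)) - 1
  let lo1 := pvMinI (active.map (fun p => p.2.1)) - 1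
  let lo2 := pvMinI (active.map (fun p => p.2.2.1)) - 1
  let lo3 := pvMinI (active.map (fun p => p.2.2.2)) - 1
  let hi0 := pvMaxI (active.map (fun p => p.1)) + 2
  let hi1 := pvMaxI (active.map (fun p => p.2.1)) + 2
  let hi2 := pvMaxI (active.map (fun p => p.2.2.1)) + 2
  let hi3 := pvMaxI (active.map (fun p => p.2.2.2)) + 2
  (PySem.List.pyRange lo0 hi0 1).foldl (fun new x =>
    (PySem.List.pyRange lo1 hi1 1).foldl (fun new y =>
      (PySem.List.pyRange lo2 hi2 1).foldl (fun new z =>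
        (PySem.List.pyRange lo3 hi3 1).foldl (fun new w =>
          let n := pvGCount active x y z w
          if n == 3 || (n == 2 && active.contains (x, y, z, w)) then
            PySem.Set.add new (x, y, z, w)
          else new) new) new) new) PySem.Set.empty

def part_2_alt (data : List String) : Int :=
  let active : PySem.Set Cell4 := (PySem.List.enumerate data).foldl (fun s yp =>
    (PySem.List.enumerate yp.2.toList).foldl (fun s xp =>
      if xp.2 == '#' then PySem.Set.add s (xp.1, yp.1, (0 : Int), (0 : Int)) else s) s) PySem.Set.empty
  -- 'if not active: break': once empty the state stays empty, so the guarded step is the loop with break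
  let fin := (List.range 6).foldl (fun s _ => if s.isEmpty then s else pvStepB s) active
  (PySem.Set.len fin : Int)

-- ===== PRECONDITION & SPEC =====
def Spec_part_2 (data : List String) (out : Int) : Prop := out = part_2_alt data
instance (data : List String) (out : Int) : Decidable (Spec_part_2 data out) := by unfold Spec_part_2; infer_instance

-- ===== CLAIM (what is proved, stated in full; the proofs are below) =====
def Claim_equal_part_2 : Prop := ∀ (data : List String), Dom_part_2 data → Spec_part_2 data (part_2 data)

-- ===== LEMMAS AND PROOFS =====

-- proof-side abbreviations
def pvMove (c t : Cell4) : Cell4 := (c.1 + t.1, c.2.1 + t.2.1, c.2.2.1 + t.2.2.1, c.2.2.2 + t.2.2.2)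
def pvSub (p c : Cell4) : Cell4 := (p.1 - c.1, p.2.1 - c.2.1, p.2.2.1 - c.2.2.1, p.2.2.2 - c.2.2.2)
def pvNbrs (a : List Cell4) : List Cell4 := a.flatMap (fun c => pvOffsetsA.map (pvMove c))
def pvKeep (a : List Cell4) (d : Cell4) : Bool :=
  (((pvNbrs a).count d : Int) == 3 || (((pvNbrs a).count d : Int) == 2 && a.contains d))
def pvDeltas : List Cell4 :=
  (PySem.List.pyRange (-1) 2 1).flatMap (fun x =>
    (PySem.List.pyRange (-1) 2 1).flatMap (fun y =>
      (PySem.List.pyRange (-1) 2 1).flatMap (fun z =>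
        (PySem.List.pyRange (-1) 2 1).map (fun w => (x, y, z, w)))))
def pvDeltasLit : List Cell4 :=
  [(-1 : Int), 0, 1].flatMap (fun dx => [(-1 : Int), 0, 1].flatMap (fun dy =>
    [(-1 : Int), 0, 1].flatMap (fun dz => [(-1 : Int), 0, 1].map (fun dw => (dx, dy, dz, dw)))))

theorem pvOffsetsA_nodup : pvOffsetsA.Nodup := by decide

theorem pvOffA_eq_filter : pvOffsetsA =
    pvDeltas.filter (fun d => decide (d ≠ ((0:Int),(0:Int),(0:Int),(0:Int)))) := by decide

theorem pvOffA_eq_filterLit : pvOffsetsA =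
    pvDeltasLit.filter (fun d => decide (d ≠ ((0:Int),(0:Int),(0:Int),(0:Int)))) := by decide

theorem pvMem_offsets (t : Cell4) :
    t ∈ pvOffsetsA ↔ ((-1 ≤ t.1 ∧ t.1 ≤ 1) ∧ (-1 ≤ t.2.1 ∧ t.2.1 ≤ 1) ∧
      (-1 ≤ t.2.2.1 ∧ t.2.2.1 ≤ 1) ∧ (-1 ≤ t.2.2.2 ∧ t.2.2.2 ≤ 1)) ∧
      ¬(t.1 = 0 ∧ t.2.1 = 0 ∧ t.2.2.1 = 0 ∧ t.2.2.2 = 0) := by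
  rw [pvOffA_eq_filter, List.mem_filter]
  obtain ⟨a, b, c, d⟩ := t
  simp [pvDeltas, List.mem_flatMap, List.mem_map, PySem.List.mem_pyRange_one, Prod.ext_iff]
  intros; omega

theorem pvSub_symm (p c : Cell4) : pvSub p c ∈ pvOffsetsA ↔ pvSub c p ∈ pvOffsetsA := by
  simp only [pvMem_offsets, pvSub]
  obtain ⟨a1,a2,a3,a4⟩ := p; obtain ⟨b1,b2,b3,b4⟩ := c
  constructor <;> intro h <;> omega

theorem pvMove_sub (p c : Cell4) : pvMove p (pvSub c p) = c := by
  obtain ⟨a1,a2,a3,a4⟩ := p; obtain ⟨b1,b2,b3,b4⟩ := c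
  simp [pvMove, pvSub]

theorem pvSub_move (p t : Cell4) : pvSub (pvMove p t) p = t := by
  obtain ⟨a1,a2,a3,a4⟩ := p; obtain ⟨b1,b2,b3,b4⟩ := t
  simp [pvMove, pvSub]

theorem pvSub_inj (p : Cell4) : Function.Injective (fun c => pvSub c p) := by
  intro c1 c2 h
  obtain ⟨a1,a2,a3,a4⟩ := c1; obtain ⟨b1,b2,b3,b4⟩ := c2; obtain ⟨q1,q2,q3,q4⟩ := p
  simp [pvSub, Prod.ext_iff] at h ⊢
  omega

-- ---- A's step is a filter of the neighbour set by pvKeep ----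
theorem pvStepA_eq_filter (a : List Cell4) :
    pvStepA a = (PySem.Set.ofList (pvNbrs a)).filter (pvKeep a) := by
  have hfun : (fun (acc : List Cell4) (d : Cell4) =>
      if a.contains d then
        (if PySem.List.count (pvNbrs a) d ≤ 3 && 2 ≤ PySem.List.count (pvNbrs a) d then acc ++ [d] else acc)
      else if PySem.List.count (pvNbrs a) d == 3 then acc ++ [d] else acc)
      = fun acc d => if pvKeep a d then acc ++ [d] else acc := by
    funext acc d
    by_cases h : a.contains d = true <;>
      simp [pvKeep, PySem.List.count] <;> split_ifs <;> simp_all <;> omega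
  show ((PySem.Set.ofList (pvNbrs a)).foldl (fun acc d =>
      if a.contains d then
        (if PySem.List.count (pvNbrs a) d ≤ 3 && 2 ≤ PySem.List.count (pvNbrs a) d then acc ++ [d] else acc)
      else if PySem.List.count (pvNbrs a) d == 3 then acc ++ [d] else acc) []) = _
  rw [hfun]
  have := PySem.List.foldl_append_if (pvKeep a) (fun d => d) (PySem.Set.ofList (pvNbrs a)) []
  simpa using this

theorem pvMem_stepA (a : List Cell4) (p : Cell4) :
    p ∈ pvStepA a ↔ p ∈ pvNbrs a ∧ pvKeep a p = true := by
  rw [pvStepA_eq_filter]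
  simp [List.mem_filter, PySem.Set.mem_ofList]

theorem pvNodup_stepA (a : List Cell4) : (pvStepA a).Nodup := by
  rw [pvStepA_eq_filter]
  exact (PySem.Set.nodup_ofList _).filter _

-- ---- generic fold with conditional Set.add ----
theorem pvFoldAdd {α β : Type} (l : List β) (F : List α → β → List α) (P : β → α → Prop)
    (h : ∀ s z, (∀ q, q ∈ F s z ↔ q ∈ s ∨ P z q) ∧ (s.Nodup → (F s z).Nodup)) :
    ∀ s : List α, (∀ q, q ∈ l.foldl F s ↔ q ∈ s ∨ ∃ z ∈ l, P z q) ∧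
      (s.Nodup → (l.foldl F s).Nodup) := by
  induction l with
  | nil => intro s; simp
  | cons z l ih =>
    intro s
    obtain ⟨hm, hn⟩ := ih (F s z)
    refine ⟨fun q => ?_, fun hs => hn ((h s z).2 hs)⟩
    rw [List.foldl_cons, hm q, (h s z).1 q]
    simp only [List.mem_cons]
    constructor
    · rintro ((h1 | h1) | ⟨z', hz', hp⟩)
      · exact Or.inl h1
      · exact Or.inr ⟨z, Or.inl rfl, h1⟩
      · exact Or.inr ⟨z', Or.inr hz', hp⟩
    · rintro (h1 | ⟨z', (rfl | hz'), hp⟩)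
      · exact Or.inl (Or.inl h1)
      · exact Or.inl (Or.inr hp)
      · exact Or.inr ⟨z', hz', hp⟩

theorem pvAddStep {α β : Type} [BEq α] [LawfulBEq α] (c : β → Bool) (g : β → α) (s : List α) (z : β) :
    (∀ q, q ∈ (if c z then PySem.Set.add s (g z) else s) ↔ q ∈ s ∨ (c z = true ∧ q = g z)) ∧
      (s.Nodup → (if c z then PySem.Set.add s (g z) else s).Nodup) := by
  by_cases hc : c z = true
  · simp only [hc, if_pos]
    exact ⟨fun q => by rw [PySem.Set.mem_add s (g z) q]; tauto, fun hs => PySem.Set.nodup_add s (g z) hs⟩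
  · simp only [hc, if_neg]
    simp [hc]

-- ---- counting: gather = scatter ----
theorem pvCountP_flatMap {β γ : Type} (l : List β) (f : β → List γ) (p : γ → Bool) :
    (l.flatMap f).countP p = (l.map (fun x => (f x).countP p)).sum := by
  induction l with
  | nil => simp
  | cons x l ih => simp [List.flatMap_cons, List.countP_append, ih]

theorem pvSum_intCast {β : Type} (l : List β) (f : β → Nat) :
    ((l.map f).sum : Int) = (l.map (fun x => (f x : Int))).sum := by
  induction l with
  | nil => simp
  | cons x l ih => simp [ih]

theorem pvGCount_flat (b : List Cell4) (x y z w : Int) :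
    pvGCount b x y z w = (pvDeltasLit.countP (fun d =>
      decide (d ≠ ((0:Int),(0:Int),(0:Int),(0:Int))) && b.contains (pvMove (x,y,z,w) d)) : Int) := by
  unfold pvGCount pvDeltasLit
  conv_lhs => simp only [PySem.List.foldl_if_add_one]
  conv_lhs => simp only [PySem.List.foldl_add]
  conv_rhs => simp only [pvCountP_flatMap, List.countP_map, pvSum_intCast, Function.comp_def, pvMove]
  simp

theorem pvGCount_eq_countP (b : List Cell4) (x y z w : Int) :
    pvGCount b x y z w =
      (pvOffsetsA.countP (fun t => decide (pvMove (x,y,z,w) t ∈ b)) : Int) := by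
  rw [pvGCount_flat, pvOffA_eq_filterLit, List.countP_filter]
  congr 2
  funext d
  simp [Bool.and_comm, List.contains_iff_mem]

theorem pvCount_map_move (c : Cell4) (p : Cell4) :
    (pvOffsetsA.map (pvMove c)).count p = if pvSub p c ∈ pvOffsetsA then 1 else 0 := by
  have h1 : (pvOffsetsA.map (pvMove c)).count p = pvOffsetsA.countP (fun t => pvMove c t == p) := by
    simp [List.count, List.countP_map, Function.comp_def]
  have h2 : (fun t => pvMove c t == p) = (fun t => t == pvSub p c) := by
    funext t
    obtain ⟨a1,a2,a3,a4⟩ := t; obtain ⟨b1,b2,b3,b4⟩ := p; obtain ⟨c1,c2,c3,c4⟩ := c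
    simp [pvMove, pvSub, Prod.ext_iff]
    constructor <;> intro h <;> omega
  rw [h1, h2, ← List.count]
  exact List.Nodup.count pvOffsetsA_nodup

theorem pvCount_nbrs (a : List Cell4) (p : Cell4) :
    (pvNbrs a).count p = a.countP (fun c => decide (pvSub p c ∈ pvOffsetsA)) := by
  induction a with
  | nil => simp [pvNbrs]
  | cons c a ih =>
    rw [pvNbrs, List.flatMap_cons, List.count_append, ← pvNbrs, ih, List.countP_cons,
      pvCount_map_move]
    by_cases h : pvSub p c ∈ pvOffsetsA <;> simp [h] <;> omega

theorem pvCountP_bij (b : List Cell4) (hb : b.Nodup) (p : Cell4) :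
    b.countP (fun c => decide (pvSub p c ∈ pvOffsetsA)) =
      pvOffsetsA.countP (fun t => decide (pvMove p t ∈ b)) := by
  have hcong : (fun c => decide (pvSub p c ∈ pvOffsetsA))
      = (fun c : Cell4 => decide (pvSub c p ∈ pvOffsetsA)) :=
    funext fun c => decide_eq_decide.mpr (pvSub_symm p c)
  rw [hcong]
  rw [List.countP_eq_length_filter, List.countP_eq_length_filter]
  have hL : ((b.filter (fun c => decide (pvSub c p ∈ pvOffsetsA))).map (fun c => pvSub c p)).Nodup :=
    (hb.filter _).map (pvSub_inj p)
  have hR : (pvOffsetsA.filter (fun t => decide (pvMove p t ∈ b))).Nodup :=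
    pvOffsetsA_nodup.filter _
  have hmem : ∀ t, t ∈ (b.filter (fun c => decide (pvSub c p ∈ pvOffsetsA))).map (fun c => pvSub c p)
      ↔ t ∈ pvOffsetsA.filter (fun t => decide (pvMove p t ∈ b)) := by
    intro t
    simp only [List.mem_map, List.mem_filter, decide_eq_true_eq]
    constructor
    · rintro ⟨c, ⟨hc, hoff⟩, rfl⟩
      exact ⟨hoff, by rw [pvMove_sub]; exact hc⟩
    · rintro ⟨hoff, hmv⟩
      exact ⟨pvMove p t, ⟨hmv, by rw [pvSub_move]; exact hoff⟩, pvSub_move p t⟩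
  have hperm := (List.perm_ext_iff_of_nodup hL hR).mpr hmem
  simpa using hperm.length_eq

-- A's scattered count equals B's gathered count, on duplicate-free active lists with equal members
theorem pvCount_eq_gcount (a b : List Cell4) (ha : a.Nodup) (hb : b.Nodup)
    (hab : ∀ q, q ∈ a ↔ q ∈ b) (p : Cell4) :
    ((pvNbrs a).count p : Int) = pvGCount b p.1 p.2.1 p.2.2.1 p.2.2.2 := by
  have hperm : a.Perm b := (List.perm_ext_iff_of_nodup ha hb).mpr hab
  have h1 : (pvNbrs a).count p = (pvNbrs b).count p :=
    ((hperm.flatMap (fun c _ => List.Perm.refl _)).count_eq p)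
  rw [h1, pvCount_nbrs, pvCountP_bij b hb, pvGCount_eq_countP]

-- ---- B's step: membership characterization and nodup ----
def pvRule (b : List Cell4) (x y z w : Int) : Bool :=
  (pvGCount b x y z w == 3 || (pvGCount b x y z w == 2 && b.contains (x, y, z, w)))

theorem pvMem_nodup_stepB (b : List Cell4) :
    (∀ q : Cell4, q ∈ pvStepB b ↔
      (∃ x ∈ PySem.List.pyRange (pvMinI (b.map (fun p => p.1)) - 1) (pvMaxI (b.map (fun p => p.1)) + 2) 1,
       ∃ y ∈ PySem.List.pyRange (pvMinI (b.map (fun p => p.2.1)) - 1) (pvMaxI (b.map (fun p => p.2.1)) + 2) 1,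
       ∃ z ∈ PySem.List.pyRange (pvMinI (b.map (fun p => p.2.2.1)) - 1) (pvMaxI (b.map (fun p => p.2.2.1)) + 2) 1,
       ∃ w ∈ PySem.List.pyRange (pvMinI (b.map (fun p => p.2.2.2)) - 1) (pvMaxI (b.map (fun p => p.2.2.2)) + 2) 1,
        pvRule b x y z w = true ∧ q = (x, y, z, w)))
    ∧ (pvStepB b).Nodup := by
  have hW : ∀ (x y z : Int) (s : List Cell4),
      (∀ q, q ∈ (PySem.List.pyRange (pvMinI (b.map (fun p => p.2.2.2)) - 1) (pvMaxI (b.map (fun p => p.2.2.2)) + 2) 1).foldl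
          (fun new w => if pvRule b x y z w then PySem.Set.add new (x, y, z, w) else new) s ↔
        q ∈ s ∨ ∃ w ∈ PySem.List.pyRange (pvMinI (b.map (fun p => p.2.2.2)) - 1) (pvMaxI (b.map (fun p => p.2.2.2)) + 2) 1,
          pvRule b x y z w = true ∧ q = (x, y, z, w)) ∧
      (s.Nodup → ((PySem.List.pyRange (pvMinI (b.map (fun p => p.2.2.2)) - 1) (pvMaxI (b.map (fun p => p.2.2.2)) + 2) 1).foldl
          (fun new w => if pvRule b x y z w then PySem.Set.add new (x, y, z, w) else new) s).Nodup) :=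
    fun x y z => pvFoldAdd _ _ _ (fun s w => pvAddStep (pvRule b x y z) (fun w => (x, y, z, w)) s w)
  have hZ : ∀ (x y : Int) (s : List Cell4), _ :=
    fun x y => pvFoldAdd (PySem.List.pyRange (pvMinI (b.map (fun p => p.2.2.1)) - 1) (pvMaxI (b.map (fun p => p.2.2.1)) + 2) 1)
      (fun s z => (PySem.List.pyRange (pvMinI (b.map (fun p => p.2.2.2)) - 1) (pvMaxI (b.map (fun p => p.2.2.2)) + 2) 1).foldl
          (fun new w => if pvRule b x y z w then PySem.Set.add new (x, y, z, w) else new) s)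
      (fun z q => ∃ w ∈ PySem.List.pyRange (pvMinI (b.map (fun p => p.2.2.2)) - 1) (pvMaxI (b.map (fun p => p.2.2.2)) + 2) 1,
          pvRule b x y z w = true ∧ q = (x, y, z, w))
      (fun s z => hW x y z s)
  have hY : ∀ (x : Int) (s : List Cell4), _ :=
    fun x => pvFoldAdd (PySem.List.pyRange (pvMinI (b.map (fun p => p.2.1)) - 1) (pvMaxI (b.map (fun p => p.2.1)) + 2) 1)
      _
      (fun y q => ∃ z ∈ PySem.List.pyRange (pvMinI (b.map (fun p => p.2.2.1)) - 1) (pvMaxI (b.map (fun p => p.2.2.1)) + 2) 1,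
        ∃ w ∈ PySem.List.pyRange (pvMinI (b.map (fun p => p.2.2.2)) - 1) (pvMaxI (b.map (fun p => p.2.2.2)) + 2) 1,
          pvRule b x y z w = true ∧ q = (x, y, z, w))
      (fun s y => hZ x y s)
  have hX : ∀ (s : List Cell4), _ :=
    pvFoldAdd (PySem.List.pyRange (pvMinI (b.map (fun p => p.1)) - 1) (pvMaxI (b.map (fun p => p.1)) + 2) 1)
      _
      (fun x q => ∃ y ∈ PySem.List.pyRange (pvMinI (b.map (fun p => p.2.1)) - 1) (pvMaxI (b.map (fun p => p.2.1)) + 2) 1,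
        ∃ z ∈ PySem.List.pyRange (pvMinI (b.map (fun p => p.2.2.1)) - 1) (pvMaxI (b.map (fun p => p.2.2.1)) + 2) 1,
        ∃ w ∈ PySem.List.pyRange (pvMinI (b.map (fun p => p.2.2.2)) - 1) (pvMaxI (b.map (fun p => p.2.2.2)) + 2) 1,
          pvRule b x y z w = true ∧ q = (x, y, z, w))
      (fun s x => hY x s)
  obtain ⟨hm, hn⟩ := hX PySem.Set.empty
  exact ⟨fun q => by simpa using hm q, hn (by simp [PySem.Set.empty])⟩

-- ---- bounding box ----
theorem pvMinI_le (l : List Int) (x : Int) (hx : x ∈ l) : pvMinI l ≤ x := by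
  unfold pvMinI
  cases h : PySem.List.min? l (fun x => x) with
  | none => exact absurd ((PySem.List.min?_eq_none_iff _ _).mp h ▸ hx) (List.not_mem_nil)
  | some m => exact PySem.List.min?_isMin h x hx

theorem pvMaxI_ge (l : List Int) (x : Int) (hx : x ∈ l) : x ≤ pvMaxI l := by
  unfold pvMaxI
  cases h : PySem.List.max? l (fun x => x) with
  | none => exact absurd ((PySem.List.max?_eq_none_iff _ _).mp h ▸ hx) (List.not_mem_nil)
  | some m => exact PySem.List.max?_isMax h x hx

-- a cell with an active neighbour lies in the grown bounding box
theorem pvInBox (b : List Cell4) (p c : Cell4) (hc : c ∈ b) (hoff : pvSub p c ∈ pvOffsetsA) :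
    (pvMinI (b.map (fun p => p.1)) - 1 ≤ p.1 ∧ p.1 < pvMaxI (b.map (fun p => p.1)) + 2) ∧
    (pvMinI (b.map (fun p => p.2.1)) - 1 ≤ p.2.1 ∧ p.2.1 < pvMaxI (b.map (fun p => p.2.1)) + 2) ∧
    (pvMinI (b.map (fun p => p.2.2.1)) - 1 ≤ p.2.2.1 ∧ p.2.2.1 < pvMaxI (b.map (fun p => p.2.2.1)) + 2) ∧
    (pvMinI (b.map (fun p => p.2.2.2)) - 1 ≤ p.2.2.2 ∧ p.2.2.2 < pvMaxI (b.map (fun p => p.2.2.2)) + 2) := by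
  rw [pvMem_offsets] at hoff
  obtain ⟨⟨h1, h2, h3, h4⟩, -⟩ := hoff
  have m1 := pvMinI_le (b.map (fun p => p.1)) c.1 (List.mem_map.mpr ⟨c, hc, rfl⟩)
  have m2 := pvMinI_le (b.map (fun p => p.2.1)) c.2.1 (List.mem_map.mpr ⟨c, hc, rfl⟩)
  have m3 := pvMinI_le (b.map (fun p => p.2.2.1)) c.2.2.1 (List.mem_map.mpr ⟨c, hc, rfl⟩)
  have m4 := pvMinI_le (b.map (fun p => p.2.2.2)) c.2.2.2 (List.mem_map.mpr ⟨c, hc, rfl⟩)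
  have n1 := pvMaxI_ge (b.map (fun p => p.1)) c.1 (List.mem_map.mpr ⟨c, hc, rfl⟩)
  have n2 := pvMaxI_ge (b.map (fun p => p.2.1)) c.2.1 (List.mem_map.mpr ⟨c, hc, rfl⟩)
  have n3 := pvMaxI_ge (b.map (fun p => p.2.2.1)) c.2.2.1 (List.mem_map.mpr ⟨c, hc, rfl⟩)
  have n4 := pvMaxI_ge (b.map (fun p => p.2.2.2)) c.2.2.2 (List.mem_map.mpr ⟨c, hc, rfl⟩)
  simp only [pvSub] at h1 h2 h3 h4
  omega

-- ---- one generation: A's step and B's step agree ----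
theorem pvStep_equiv (a b : List Cell4) (ha : a.Nodup) (hb : b.Nodup)
    (hab : ∀ q, q ∈ a ↔ q ∈ b) :
    (pvStepA a).Nodup ∧ (pvStepB b).Nodup ∧ (∀ q, q ∈ pvStepA a ↔ q ∈ pvStepB b) := by
  obtain ⟨hmB, hnB⟩ := pvMem_nodup_stepB b
  refine ⟨pvNodup_stepA a, hnB, fun q => ?_⟩
  obtain ⟨q1, q2, q3, q4⟩ := q
  have hcnt := pvCount_eq_gcount a b ha hb hab (q1, q2, q3, q4)
  have hcontains : a.contains (q1, q2, q3, q4) = b.contains (q1, q2, q3, q4) := by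
    by_cases h : (q1, q2, q3, q4) ∈ a
    · have h' := (hab _).mp h
      simp [List.contains_iff_mem, h, h']
    · have h' : (q1, q2, q3, q4) ∉ b := fun hq => h ((hab _).mpr hq)
      simp [List.contains_iff_mem, h, h']
  have hkeep : pvKeep a (q1, q2, q3, q4) = pvRule b q1 q2 q3 q4 := by
    unfold pvKeep pvRule
    rw [show ((pvNbrs a).count (q1, q2, q3, q4) : Int) = pvGCount b q1 q2 q3 q4 from hcnt,
      hcontains]
  rw [pvMem_stepA, hmB (q1, q2, q3, q4)]
  constructor
  · rintro ⟨hmem, hk⟩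
    -- a live-neighbour count ≥ 2 gives an active neighbour, hence box bounds
    have hcount2 : (2 : Int) ≤ ((pvNbrs a).count (q1, q2, q3, q4) : Int) := by
      unfold pvKeep at hk
      rcases Bool.or_eq_true_iff.mp hk with h | h
      · have := beq_iff_eq.mp h; omega
      · have := beq_iff_eq.mp (Bool.and_eq_true_iff.mp h).1; omega
    have hpos : 0 < (pvNbrs b).count (q1, q2, q3, q4) := by
      have hperm : a.Perm b := (List.perm_ext_iff_of_nodup ha hb).mpr hab
      have : (pvNbrs a).count (q1, q2, q3, q4) = (pvNbrs b).count (q1, q2, q3, q4) :=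
        ((hperm.flatMap (fun c _ => List.Perm.refl _)).count_eq (q1, q2, q3, q4))
      omega
    have hqmem : (q1, q2, q3, q4) ∈ pvNbrs b := List.count_pos_iff.mp hpos
    obtain ⟨c, hc, hmap⟩ := List.mem_flatMap.mp hqmem
    obtain ⟨t, ht, hqe⟩ := List.mem_map.mp hmap
    have hoff : pvSub (q1, q2, q3, q4) c ∈ pvOffsetsA := by
      rw [← hqe, pvSub_move]; exact ht
    obtain ⟨b1, b2, b3, b4⟩ := pvInBox b (q1, q2, q3, q4) c hc hoff
    refine ⟨q1, ?_, q2, ?_, q3, ?_, q4, ?_, by rw [← hkeep]; exact hk, rfl⟩ <;>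
      rw [PySem.List.mem_pyRange_one] <;>
      simp only [] at b1 b2 b3 b4 <;> omega
  · rintro ⟨x, hx, y, hy, z, hz, w, hw, hr, heq⟩
    obtain ⟨rfl, rfl, rfl, rfl⟩ : q1 = x ∧ q2 = y ∧ q3 = z ∧ q4 = w := by
      simpa [Prod.ext_iff] using heq
    refine ⟨?_, by rw [hkeep]; exact hr⟩
    -- the rule fired, so the gathered count is ≥ 2: some neighbour is active
    have hg : (2 : Int) ≤ pvGCount b q1 q2 q3 q4 := by
      unfold pvRule at hr
      rcases Bool.or_eq_true_iff.mp hr with h | h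
      · have := beq_iff_eq.mp h; omega
      · have := beq_iff_eq.mp (Bool.and_eq_true_iff.mp h).1; omega
    have hcpos : 0 < pvOffsetsA.countP (fun t => decide (pvMove (q1, q2, q3, q4) t ∈ b)) := by
      have := pvGCount_eq_countP b q1 q2 q3 q4
      omega
    obtain ⟨t, ht, hmv⟩ := List.countP_pos_iff.mp hcpos
    have hmvb : pvMove (q1, q2, q3, q4) t ∈ b := of_decide_eq_true hmv
    have hca : pvMove (q1, q2, q3, q4) t ∈ a := (hab _).mpr hmvb
    refine List.mem_flatMap.mpr ⟨pvMove (q1, q2, q3, q4) t, hca, List.mem_map.mpr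
      ⟨pvSub (q1, q2, q3, q4) (pvMove (q1, q2, q3, q4) t), ?_, pvMove_sub _ _⟩⟩
    rw [← pvSub_symm, pvSub_move]
    exact ht

-- ---- the initial board: B's set build equals A's list build, and is duplicate-free ----
-- one row: Set.add only ever sees fresh cells, so it appends
theorem pvRow_eq (yi : Int) (cs : List Char) : ∀ (k : Int) (s : List Cell4),
    (∀ p ∈ s, p.2.1 = yi → p.1 < k) →
    ((PySem.List.enumerate cs k).foldl (fun s xp =>
        if xp.2 == '#' then PySem.Set.add s (xp.1, yi, (0 : Int), (0 : Int)) else s) s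
      = (PySem.List.enumerate cs k).foldl (fun s xp =>
        if xp.2 == '#' then s ++ [(xp.1, yi, (0 : Int), (0 : Int))] else s) s
    ∧ ∀ p ∈ (PySem.List.enumerate cs k).foldl (fun s xp =>
        if xp.2 == '#' then s ++ [(xp.1, yi, (0 : Int), (0 : Int))] else s) s,
        p ∈ s ∨ p.2.1 = yi) := by
  induction cs with
  | nil => intro k s _; exact ⟨rfl, fun p hp => Or.inl hp⟩
  | cons c cs ih =>
    intro k s hs
    rw [PySem.List.enumerate_cons]
    by_cases hc : (c == '#') = true
    · simp only [List.foldl_cons, hc, if_pos]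
      have hnot : ((k, yi, (0 : Int), (0 : Int)) : Cell4) ∉ s := by
        intro hmem
        have := hs _ hmem rfl
        omega
      rw [PySem.Set.add_of_not_mem hnot]
      have hs' : ∀ p ∈ s ++ [((k, yi, (0 : Int), (0 : Int)) : Cell4)], p.2.1 = yi → p.1 < k + 1 := by
        intro p hp hpy
        rcases List.mem_append.mp hp with h | h
        · have := hs _ h hpy; omega
        · simp at h; subst h; simp
      obtain ⟨h1, h2⟩ := ih (k + 1) _ hs'
      refine ⟨h1, fun p hp => ?_⟩
      rcases h2 p hp with h | h
      · rcases List.mem_append.mp h with h | h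
        · exact Or.inl h
        · simp at h; subst h; exact Or.inr rfl
      · exact Or.inr h
    · simp only [List.foldl_cons, hc, if_neg, Bool.false_eq_true, not_false_iff]
      have hs' : ∀ p ∈ s, p.2.1 = yi → p.1 < k + 1 := fun p hp hpy => by
        have := hs p hp hpy; omega
      exact ih (k + 1) s hs'

-- the whole initial board
theorem pvGrid_eq (rows : List String) : ∀ (j : Int) (s : List Cell4),
    (∀ p ∈ s, p.2.1 < j) →
    ((PySem.List.enumerate rows j).foldl (fun s yp =>
        (PySem.List.enumerate yp.2.toList).foldl (fun s xp =>
          if xp.2 == '#' then PySem.Set.add s (xp.1, yp.1, (0 : Int), (0 : Int)) else s) s) s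
      = (PySem.List.enumerate rows j).foldl (fun acc yp =>
        (PySem.List.enumerate yp.2.toList).foldl (fun acc xp =>
          if xp.2 == '#' then acc ++ [(xp.1, yp.1, (0 : Int), (0 : Int))] else acc) acc) s
    ∧ ∀ p ∈ (PySem.List.enumerate rows j).foldl (fun acc yp =>
        (PySem.List.enumerate yp.2.toList).foldl (fun acc xp =>
          if xp.2 == '#' then acc ++ [(xp.1, yp.1, (0 : Int), (0 : Int))] else acc) acc) s,
        p ∈ s ∨ j ≤ p.2.1) := by
  induction rows with
  | nil => intro j s _; exact ⟨rfl, fun p hp => Or.inl hp⟩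
  | cons y ys ih =>
    intro j s hs
    rw [PySem.List.enumerate_cons]
    simp only [List.foldl_cons]
    have hrow := pvRow_eq j y.toList 0 s (fun p hp hpy => by
      have := hs p hp; omega)
    obtain ⟨hr1, hr2⟩ := hrow
    rw [hr1]
    have hs' : ∀ p ∈ (PySem.List.enumerate y.toList 0).foldl (fun s xp =>
        if xp.2 == '#' then s ++ [(xp.1, j, (0 : Int), (0 : Int))] else s) s, p.2.1 < j + 1 := by
      intro p hp
      rcases hr2 p hp with h | h
      · have := hs p h; omega
      · omega
    obtain ⟨h1, h2⟩ := ih (j + 1) _ hs'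
    refine ⟨h1, fun p hp => ?_⟩
    rcases h2 p hp with h | h
    · rcases hr2 p h with h | h
      · exact Or.inl h
      · omega
    · omega

theorem pvInit_eq (data : List String) :
    (PySem.List.enumerate data).foldl (fun s yp =>
      (PySem.List.enumerate yp.2.toList).foldl (fun s xp =>
        if xp.2 == '#' then PySem.Set.add s (xp.1, yp.1, (0 : Int), (0 : Int)) else s) s)
      PySem.Set.empty =
    (PySem.List.enumerate data).foldl (fun acc yp =>
      (PySem.List.enumerate yp.2.toList).foldl (fun acc xp =>
        if xp.2 == '#' then acc ++ [(xp.1, yp.1, (0 : Int), (0 : Int))] else acc) acc) [] :=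
  (pvGrid_eq data 0 [] (by intro p hp; simp at hp)).1

theorem pvInit_nodup (data : List String) :
    ((PySem.List.enumerate data).foldl (fun s yp =>
      (PySem.List.enumerate yp.2.toList).foldl (fun s xp =>
        if xp.2 == '#' then PySem.Set.add s (xp.1, yp.1, (0 : Int), (0 : Int)) else s) s)
      PySem.Set.empty).Nodup := by
  have houter := pvFoldAdd (PySem.List.enumerate data)
    (fun s yp => (PySem.List.enumerate yp.2.toList).foldl (fun s xp =>
        if xp.2 == '#' then PySem.Set.add s (xp.1, yp.1, (0 : Int), (0 : Int)) else s) s)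
    (fun yp q => ∃ xp ∈ PySem.List.enumerate yp.2.toList,
        (xp.2 == '#') = true ∧ q = (xp.1, yp.1, (0 : Int), (0 : Int)))
    (fun s yp => pvFoldAdd (PySem.List.enumerate yp.2.toList) _ _
      (fun s xp => pvAddStep (fun xp => xp.2 == '#') (fun xp => (xp.1, yp.1, (0 : Int), (0 : Int))) s xp) s)
  exact (houter PySem.Set.empty).2 (by simp [PySem.Set.empty])

-- ---- the six generations ----
theorem pvLoop (l : List Nat) : ∀ (a b : List Cell4), a.Nodup → b.Nodup → (∀ q, q ∈ a ↔ q ∈ b) →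
    ((l.foldl (fun a _ => pvStepA a) a).Nodup ∧
     (l.foldl (fun s _ => if s.isEmpty then s else pvStepB s) b).Nodup ∧
     (∀ q, q ∈ l.foldl (fun a _ => pvStepA a) a ↔
        q ∈ l.foldl (fun s _ => if s.isEmpty then s else pvStepB s) b)) := by
  induction l with
  | nil => intro a b ha hb hab; exact ⟨ha, hb, hab⟩
  | cons n l ih =>
    intro a b ha hb hab
    simp only [List.foldl_cons]
    by_cases hbe : b = []
    · subst hbe
      have hae : a = [] := List.eq_nil_iff_forall_not_mem.mpr (fun q hq => by simpa using (hab q).mp hq)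
      subst hae
      have hstepA : pvStepA ([] : List Cell4) = [] := by rfl
      simpa [hstepA] using ih [] [] List.nodup_nil List.nodup_nil (fun q => Iff.rfl)
    · have hguard : (b.isEmpty = false) := by simpa [List.isEmpty_iff] using hbe
      obtain ⟨hnA, hnB, hmem⟩ := pvStep_equiv a b ha hb hab
      simpa [hguard] using ih (pvStepA a) (pvStepB b) hnA hnB hmem


-- ===== VERDICT (by name: the statement is the Claim_ definition above) =====
theorem part_2_spec : Claim_equal_part_2 := by
  intro data _
  unfold Spec_part_2 part_2 part_2_alt
  rw [pvInit_eq]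
  have hnd : ((PySem.List.enumerate data).foldl (fun acc yp =>
      (PySem.List.enumerate yp.2.toList).foldl (fun acc xp =>
        if xp.2 == '#' then acc ++ [(xp.1, yp.1, (0 : Int), (0 : Int))] else acc) acc)
      ([] : List Cell4)).Nodup := by
    have := pvInit_nodup data
    rwa [pvInit_eq data] at this
  obtain ⟨hnA, hnB, hmem⟩ := pvLoop (List.range 6) _ _ hnd hnd (fun q => Iff.rfl)
  have hperm := (List.perm_ext_iff_of_nodup hnA hnB).mpr hmem
  simp only [PySem.Set.len]
  exact_mod_cast hperm.length_eq
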